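-- pv_equiv track=rewrite | github.com/jigold/hail | hail/python/hailtop/utils/os.py | escape
-- ===== SOURCE A (Python) =====
-- wildcards = ('*', '?', '[', ']', '{', '}')
--
-- def escape(path):
--     new_path = []
--     n = len(path)
--     i = 0
--     while i < n:
--         if i < n - 1 and path[i] == '\\' and path[i + 1] in wildcards:
--             new_path.append('[')
--             new_path.append(path[i + 1])
--             new_path.append(']')
--             i += 2
--             continue
--
--         new_path.append(path[i])
--         i += 1
--     return ''.join(new_path)
-- ===== SOURCE B (Python) =====
-- wildcards = ('*', '?', '[', ']', '{', '}')
--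
-- def escape(path):
--     out = []
--     pending = False  # a backslash has been read and not yet resolved
--     for c in path:
--         if pending:
--             if c in wildcards:
--                 out.append('[' + c + ']')
--                 pending = False
--             elif c == '\\':
--                 out.append('\\')  # previous backslash was literal; this one is now pending
--             else:
--                 out.append('\\' + c)
--                 pending = False
--         elif c == '\\':
--             pending = True
--         else:
--             out.append(c)
--     if pending:
--         out.append('\\')
--     return ''.join(out)
-- ===== Notes on version B (the rewrite author's own statement) =====
-- stated objective: alternative
-- what changed: Replaces the index-based while loop with two-character lookahead (path[i], path[i+1], skip-by-2) by a single-pass finite-state machine over the characters with a pending-backslash flag and no indexing.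
import Mathlib
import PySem

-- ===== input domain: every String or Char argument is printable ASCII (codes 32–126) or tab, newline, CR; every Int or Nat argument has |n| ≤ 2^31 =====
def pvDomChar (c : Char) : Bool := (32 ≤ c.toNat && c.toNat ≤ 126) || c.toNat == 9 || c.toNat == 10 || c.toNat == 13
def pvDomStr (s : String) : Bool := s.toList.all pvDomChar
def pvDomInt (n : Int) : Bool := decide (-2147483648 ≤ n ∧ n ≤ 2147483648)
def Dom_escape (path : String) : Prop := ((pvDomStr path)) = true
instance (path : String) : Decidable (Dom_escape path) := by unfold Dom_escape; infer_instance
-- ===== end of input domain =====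

-- B replaces A's index-based while loop with two-char lookahead by a one-pass
-- pending-backslash state machine (objective: alternative; same cost).

-- ===== PORT A =====
-- module-level constant `wildcards`
def wildcards : List Char := ['*', '?', '[', ']', '{', '}']

-- A's while loop: the remaining characters are path[i:]; the `c :: d :: rest`
-- pattern is A's `i < n - 1` lookahead at path[i], path[i+1]; acc is new_path.
def escapeLoop (acc : List Char) : List Char → List Char
  | c :: d :: rest =>
      if c = '\\' ∧ d ∈ wildcards then escapeLoop (acc ++ ['[', d, ']']) rest
      else escapeLoop (acc ++ [c]) (d :: rest)
  | [c] => acc ++ [c]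
  | [] => acc

def escape (path : String) : String := String.ofList (escapeLoop [] path.toList)

-- ===== PORT B =====
-- one step of B's for-loop: state = (out so far, pending backslash flag)
def stepB (st : List Char × Bool) (c : Char) : List Char × Bool :=
  if st.2 then
    if c ∈ wildcards then (st.1 ++ ['[', c, ']'], false)
    else if c = '\\' then (st.1 ++ ['\\'], true)
    else (st.1 ++ ['\\', c], false)
  else if c = '\\' then (st.1, true)
  else (st.1 ++ [c], false)

def escape_alt (path : String) : String :=
  let r := path.toList.foldl stepB ([], false)
  String.ofList (if r.2 then r.1 ++ ['\\'] else r.1)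

-- ===== PRECONDITION & SPEC =====
def Spec_escape (path : String) (out : String) : Prop := out = escape_alt path
instance (path : String) (out : String) : Decidable (Spec_escape path out) := by unfold Spec_escape; infer_instance

-- ===== CLAIM (what is proved, stated in full; the proofs are below) =====
def Claim_equal_escape : Prop := ∀ (path : String), Dom_escape path → Spec_escape path (escape path)

-- ===== LEMMAS AND PROOFS =====

def finishB (st : List Char × Bool) : List Char :=
  if st.2 then st.1 ++ ['\\'] else st.1

theorem escapeLoop_cons_ne (acc : List Char) (c : Char) (l : List Char)
    (hc : c ≠ '\\') : escapeLoop acc (c :: l) = escapeLoop (acc ++ [c]) l := by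
  cases l with
  | nil => simp [escapeLoop]
  | cons d r => simp [escapeLoop, hc]

theorem foldB_eq_loop (l : List Char) : ∀ acc : List Char,
    finishB (l.foldl stepB (acc, false)) = escapeLoop acc l ∧
    finishB (l.foldl stepB (acc, true)) = escapeLoop acc ('\\' :: l) := by
  induction l with
  | nil => intro acc; simp [finishB, escapeLoop]
  | cons c l ih =>
    intro acc
    constructor
    · by_cases hc : c = '\\'
      · subst hc
        simpa [stepB] using (ih acc).2
      · rw [List.foldl_cons, escapeLoop_cons_ne acc c l hc]
        simpa [stepB, hc] using (ih (acc ++ [c])).1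
    · by_cases hw : c ∈ wildcards
      · have hcb : c ≠ '\\' := by
          intro h; subst h; simp [wildcards] at hw
        rw [List.foldl_cons]
        have : stepB (acc, true) c = (acc ++ ['[', c, ']'], false) := by
          simp [stepB, hw]
        rw [this]
        have h2 : escapeLoop acc ('\\' :: c :: l) = escapeLoop (acc ++ ['[', c, ']']) l := by
          simp [escapeLoop, hw]
        rw [h2]
        exact (ih (acc ++ ['[', c, ']'])).1
      · by_cases hc : c = '\\'
        · subst hc
          rw [List.foldl_cons]
          have : stepB (acc, true) '\\' = (acc ++ ['\\'], true) := by
            simp [stepB, wildcards]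
          rw [this]
          have h2 : escapeLoop acc ('\\' :: '\\' :: l) = escapeLoop (acc ++ ['\\']) ('\\' :: l) := by
            simp [escapeLoop, wildcards]
          rw [h2]
          exact (ih (acc ++ ['\\'])).2
        · rw [List.foldl_cons]
          have : stepB (acc, true) c = (acc ++ ['\\', c], false) := by
            simp [stepB, hw, hc]
          rw [this]
          have h2 : escapeLoop acc ('\\' :: c :: l) = escapeLoop (acc ++ ['\\']) (c :: l) := by
            simp [escapeLoop, hw]
          rw [h2, escapeLoop_cons_ne _ c l hc]
          simpa using (ih (acc ++ ['\\', c])).1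

-- ===== VERDICT (by name: the statement is the Claim_ definition above) =====
theorem escape_spec : Claim_equal_escape := by
  intro path _
  unfold Spec_escape escape escape_alt
  have h := (foldB_eq_loop path.toList []).1
  simp only [finishB] at h
  simp [← h]
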